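-- pv_equiv track=rewrite | github.com/Simon-McIntosh/IMAS-Standard-Names | imas_standard_names/grammar/parser.py | _longest_suffix_match
-- ===== SOURCE A (Python) =====
-- def _longest_suffix_match(s: str, tokens: set[str]) -> str | None:
--     best: str | None = None
--     for tok in tokens:
--         marker = f"_{tok}"
--         if s.endswith(marker) and len(s) > len(marker):
--             if best is None or len(tok) > len(best):
--                 best = tok
--     return best
-- ===== SOURCE B (Python) =====
-- def _longest_suffix_match(s: str, tokens: set[str]) -> str | None:
--     # Scan underscore positions left to right: the earliest underscore (at index >= 1)
--     # whose trailing substring is a token gives the longest match.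
--     for i in range(1, len(s)):
--         if s[i] == '_' and s[i + 1:] in tokens:
--             return s[i + 1:]
--     return None
-- ===== Notes on version B (the rewrite author's own statement) =====
-- stated objective: alternative
-- what changed: Instead of testing every token as a suffix of s and keeping the longest, B scans underscore positions of s left to right and returns the first trailing substring found in the token set (the earliest underscore gives the longest match, which is unique per length).
import Mathlib
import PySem

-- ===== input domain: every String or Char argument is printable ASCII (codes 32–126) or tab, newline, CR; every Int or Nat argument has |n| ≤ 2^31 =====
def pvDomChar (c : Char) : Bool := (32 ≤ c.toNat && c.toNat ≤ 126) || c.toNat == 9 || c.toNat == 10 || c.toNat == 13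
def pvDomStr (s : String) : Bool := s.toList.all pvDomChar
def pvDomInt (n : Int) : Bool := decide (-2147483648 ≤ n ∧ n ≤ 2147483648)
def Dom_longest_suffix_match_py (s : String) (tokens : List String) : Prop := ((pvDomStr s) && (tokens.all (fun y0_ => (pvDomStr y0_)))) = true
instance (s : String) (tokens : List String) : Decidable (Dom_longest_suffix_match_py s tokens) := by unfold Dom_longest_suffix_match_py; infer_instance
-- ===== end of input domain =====

-- B replaces A's scan over all tokens by a left-to-right scan of underscore positions of s
-- (earliest underscore whose trailing substring is a token = longest match).

-- ===== PORT A =====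
-- one loop iteration of A: marker = "_"+tok; keep tok if marker is a proper suffix and tok is longer than best
def pvStepA (s : String) (best : Option String) (tok : String) : Option String :=
  let marker := "_" ++ tok
  if PySem.Str.endswith s marker = true ∧ PySem.Str.len s > PySem.Str.len marker then
    match best with
    | none => some tok
    | some b => if PySem.Str.len tok > PySem.Str.len b then some tok else some b
  else best

def longest_suffix_match_py (s : String) (tokens : List String) : Option String :=
  tokens.foldl (pvStepA s) none

-- ===== PORT B =====
-- B's loop over positions i = 1 .. len(s)-1, as structural recursion over the suffix of s
-- starting at index 1: head = s[i], tail = s[i+1:]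
def pvScanB (tokens : List String) : List Char → Option String
  | [] => none
  | c :: rest =>
    if c = '_' ∧ String.ofList rest ∈ tokens then some (String.ofList rest)
    else pvScanB tokens rest

def longest_suffix_match_py_alt (s : String) (tokens : List String) : Option String :=
  match s.toList with
  | [] => none
  | _ :: t => pvScanB tokens t

-- ===== PRECONDITION & SPEC =====
def Spec_longest_suffix_match_py (s : String) (tokens : List String) (out : Option String) : Prop := out = longest_suffix_match_py_alt s tokens
instance (s : String) (tokens : List String) (out : Option String) : Decidable (Spec_longest_suffix_match_py s tokens out) := by unfold Spec_longest_suffix_match_py; infer_instance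

-- ===== CLAIM (what is proved, stated in full; the proofs are below) =====
def Claim_equal_longest_suffix_match_py : Prop := ∀ (s : String) (tokens : List String), Dom_longest_suffix_match_py s tokens → Spec_longest_suffix_match_py s tokens (longest_suffix_match_py s tokens)

-- ===== LEMMAS AND PROOFS =====

-- the condition A tests for a token: "_"+tok is a proper suffix of s
def pvP (s tok : String) : Prop :=
  PySem.Str.endswith s ("_" ++ tok) = true ∧ PySem.Str.len s > PySem.Str.len ("_" ++ tok)

lemma pvLen_eq (u : String) : PySem.Str.len u = u.toList.length := by
  simp [PySem.Str.len]

lemma pvMarker_toList (tok : String) : ("_" ++ tok).toList = '_' :: tok.toList := by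
  simp

lemma pvP_iff (s tok : String) :
    pvP s tok ↔ ('_' :: tok.toList) <:+ s.toList ∧ tok.length + 1 < s.length := by
  unfold pvP
  rw [pvLen_eq, pvLen_eq, pvMarker_toList]
  constructor
  · rintro ⟨h1, h2⟩
    have := (PySem.Chars.endswith_iff (s := s.toList) (p := ("_" ++ tok).toList)).1 (by simpa using h1)
    rw [pvMarker_toList] at this
    simp at h2
    exact ⟨this, by omega⟩
  · rintro ⟨h1, h2⟩
    refine ⟨?_, by simp; omega⟩
    have := (PySem.Chars.endswith_iff (s := s.toList) (p := ("_" ++ tok).toList)).2 (by rw [pvMarker_toList]; exact h1)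
    simpa using this

-- one-step facts about pvStepA
lemma pvStepA_facts (s : String) (best : Option String) (t : String) :
    (∀ b, best = some b → ∃ b'', pvStepA s best t = some b'' ∧ b.toList.length ≤ b''.toList.length) ∧
    (pvP s t → ∃ b'', pvStepA s best t = some b'' ∧ t.toList.length ≤ b''.toList.length) ∧
    (∀ b'', pvStepA s best t = some b'' → (b'' = t ∧ pvP s t) ∨ best = some b'') := by
  have hunfold : pvStepA s best t =
      if PySem.Str.endswith s ("_" ++ t) = true ∧ PySem.Str.len s > PySem.Str.len ("_" ++ t) then
        (match best with
         | none => some t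
         | some b => if PySem.Str.len t > PySem.Str.len b then some t else some b)
      else best := rfl
  by_cases hP : PySem.Str.endswith s ("_" ++ t) = true ∧ PySem.Str.len s > PySem.Str.len ("_" ++ t)
  · rw [hunfold, if_pos hP]
    cases best with
    | none =>
      refine ⟨by simp, fun _ => ⟨t, rfl, le_refl _⟩, ?_⟩
      intro b'' hb''
      exact Or.inl ⟨(Option.some.inj hb'').symm, hP⟩
    | some b =>
      have hred : (match some b with
          | none => some t
          | some b => if PySem.Str.len t > PySem.Str.len b then some t else some b)
          = if PySem.Str.len t > PySem.Str.len b then some t else some b := rfl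
      rw [hred]
      by_cases hl : PySem.Str.len t > PySem.Str.len b
      · rw [if_pos hl]
        rw [pvLen_eq, pvLen_eq] at hl
        refine ⟨?_, fun _ => ⟨t, rfl, le_refl _⟩,
          fun b'' hb'' => Or.inl ⟨(Option.some.inj hb'').symm, hP⟩⟩
        intro b0 hb0
        obtain rfl : b = b0 := by injection hb0
        exact ⟨t, rfl, by exact_mod_cast le_of_lt hl⟩
      · rw [if_neg hl]
        rw [pvLen_eq, pvLen_eq] at hl
        refine ⟨?_, fun _ => ⟨b, rfl, by omega⟩, fun b'' hb'' => Or.inr hb''⟩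
        intro b0 hb0
        obtain rfl : b = b0 := by injection hb0
        exact ⟨b, rfl, le_refl _⟩
  · rw [hunfold, if_neg hP]
    exact ⟨fun b hb => ⟨b, hb, le_refl _⟩, fun hp => absurd hp hP, fun b'' hb'' => Or.inr hb''⟩

-- fold invariant for A: (a) an existing best survives with length not decreasing,
-- (b) every matching token is dominated by the result, (c) a some-result is a matching member or the initial best
lemma pvFoldA_inv (s : String) (toks : List String) : ∀ best : Option String,
    (∀ b, best = some b → ∃ b', toks.foldl (pvStepA s) best = some b' ∧ b.toList.length ≤ b'.toList.length) ∧
    (∀ t ∈ toks, pvP s t → ∃ b', toks.foldl (pvStepA s) best = some b' ∧ t.toList.length ≤ b'.toList.length) ∧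
    (∀ b', toks.foldl (pvStepA s) best = some b' → (pvP s b' ∧ b' ∈ toks) ∨ best = some b') := by
  induction toks with
  | nil =>
    intro best
    exact ⟨fun b hb => ⟨b, hb, le_refl _⟩, by simp, fun b' hb' => Or.inr hb'⟩
  | cons t rest IH =>
    intro best
    obtain ⟨s1, s2, s3⟩ := pvStepA_facts s best t
    obtain ⟨a1, a2, a3⟩ := IH (pvStepA s best t)
    refine ⟨?_, ?_, ?_⟩
    · intro b hb
      obtain ⟨b'', h1, h2⟩ := s1 b hb
      obtain ⟨b', hh1, hh2⟩ := a1 b'' h1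
      exact ⟨b', hh1, le_trans h2 hh2⟩
    · intro t' ht' hp
      rcases List.mem_cons.1 ht' with rfl | hmem
      · obtain ⟨b'', h1, h2⟩ := s2 hp
        obtain ⟨b', hh1, hh2⟩ := a1 b'' h1
        exact ⟨b', hh1, le_trans h2 hh2⟩
      · exact a2 t' hmem hp
    · intro b' hb'
      rcases a3 b' hb' with ⟨hp, hm⟩ | hnb
      · exact Or.inl ⟨hp, List.mem_cons_of_mem _ hm⟩
      · rcases s3 b' hnb with ⟨rfl, hp⟩ | hbest
        · exact Or.inl ⟨hp, List.mem_cons_self⟩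
        · exact Or.inr hbest

-- scan soundness: a some-result is the longest token whose "_"-marker is a suffix of t
lemma pvScanB_some (tokens : List String) (t : List Char) (x : String)
    (h : pvScanB tokens t = some x) :
    ∃ r, x = String.ofList r ∧ ('_' :: r) <:+ t ∧ String.ofList r ∈ tokens ∧
      ∀ r', ('_' :: r') <:+ t → String.ofList r' ∈ tokens → r'.length ≤ r.length := by
  induction t with
  | nil => simp [pvScanB] at h
  | cons c rest IH =>
    by_cases hc : c = '_' ∧ String.ofList rest ∈ tokens
    · rw [pvScanB, if_pos hc] at h
      obtain rfl : String.ofList rest = x := by injection h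
      refine ⟨rest, rfl, ?_, hc.2, ?_⟩
      · rw [hc.1]
      · intro r' hr' _
        have := hr'.length_le
        simp at this
        omega
    · rw [pvScanB, if_neg hc] at h
      obtain ⟨r, rfl, hsfx, hmem, hmax⟩ := IH h
      refine ⟨r, rfl, hsfx.trans (List.suffix_cons c rest), hmem, ?_⟩
      intro r' hr' hmem'
      rcases List.suffix_cons_iff.1 hr' with heq | hsfx'
      · exfalso
        have h1 : c = '_' := by injection heq with hh _; exact hh.symm
        have h2 : r' = rest := by injection heq
        exact hc ⟨h1, h2 ▸ hmem'⟩
      · exact hmax r' hsfx' hmem'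

lemma pvScanB_none (tokens : List String) (t : List Char)
    (h : pvScanB tokens t = none) :
    ∀ r, ('_' :: r) <:+ t → String.ofList r ∉ tokens := by
  induction t with
  | nil =>
    intro r hr
    have := hr.length_le
    simp at this
  | cons c rest IH =>
    by_cases hc : c = '_' ∧ String.ofList rest ∈ tokens
    · rw [pvScanB, if_pos hc] at h; exact absurd h (by simp)
    · rw [pvScanB, if_neg hc] at h
      intro r hr hmem
      rcases List.suffix_cons_iff.1 hr with heq | hsfx
      · have h2 : r = rest := by injection heq
        have h1 : c = '_' := by injection heq with hh _; exact hh.symm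
        exact hc ⟨h1, h2 ▸ hmem⟩
      · exact IH h r hsfx hmem

-- two suffixes of the same list with equal length are equal
lemma pvSuffix_eq_of_length {l1 l2 t : List Char} (h1 : l1 <:+ t) (h2 : l2 <:+ t)
    (h : l1.length = l2.length) : l1 = l2 := by
  rw [List.suffix_iff_eq_drop] at h1 h2
  rw [h1, h2, h]

-- ===== VERDICT (by name: the statement is the Claim_ definition above) =====
theorem longest_suffix_match_py_spec : Claim_equal_longest_suffix_match_py := by
  intro s tokens _
  unfold Spec_longest_suffix_match_py longest_suffix_match_py longest_suffix_match_py_alt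
  obtain ⟨_, hb, hc⟩ := pvFoldA_inv s tokens none
  cases hs : s.toList with
  | nil =>
    cases hfold : tokens.foldl (pvStepA s) none with
    | none => rfl
    | some b' =>
      exfalso
      rcases hc b' hfold with ⟨hp, _⟩ | hcontra
      · have hlen := ((pvP_iff s b').1 hp).2
        have : s.length = 0 := by
          have := congrArg List.length hs
          simpa using this
        omega
      · exact absurd hcontra (by simp)
  | cons c0 tl =>
    have hslen : s.length = tl.length + 1 := by
      have := congrArg List.length hs
      simpa using this
    cases hfold : tokens.foldl (pvStepA s) none with
    | none =>
      cases hscan : pvScanB tokens tl with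
      | none => show (none : Option String) = pvScanB tokens tl; rw [hscan]
      | some x =>
        exfalso
        obtain ⟨r, rfl, hsfx, hmem, _⟩ := pvScanB_some tokens tl x hscan
        have hp : pvP s (String.ofList r) := by
          rw [pvP_iff]
          have hs' : ('_' :: r) <:+ s.toList := by
            rw [hs]; exact hsfx.trans (List.suffix_cons c0 tl)
          have hlen := hsfx.length_le
          simp at hlen ⊢
          exact ⟨hs', by omega⟩
        obtain ⟨b', hb', _⟩ := hb (String.ofList r) hmem hp
        rw [hfold] at hb'; exact absurd hb' (by simp)
    | some b =>
      rcases hc b hfold with ⟨hp, hbmem⟩ | hcontra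
      · obtain ⟨hsfx, hlen⟩ := (pvP_iff s b).1 hp
        have hbl : b.toList.length = b.length := by simp
        rw [hs] at hsfx
        have hsfxtl : ('_' :: b.toList) <:+ tl := by
          rcases List.suffix_cons_iff.1 hsfx with heq | h
          · exfalso
            have := congrArg List.length heq
            simp at this
            omega
          · exact h
        cases hscan : pvScanB tokens tl with
        | none =>
          exfalso
          exact pvScanB_none tokens tl hscan b.toList hsfxtl (by simpa using hbmem)
        | some x =>
          obtain ⟨r, rfl, hsfx', hmem', hmax⟩ := pvScanB_some tokens tl x hscan
          have h1 : b.toList.length ≤ r.length := hmax b.toList hsfxtl (by simpa using hbmem)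
          have h2 : r.length ≤ b.toList.length := by
            have hp' : pvP s (String.ofList r) := by
              rw [pvP_iff]
              have hs' : ('_' :: r) <:+ s.toList := by
                rw [hs]; exact hsfx'.trans (List.suffix_cons c0 tl)
              have hlen' := hsfx'.length_le
              simp at hlen' ⊢
              exact ⟨hs', by omega⟩
            obtain ⟨b', hb', hle⟩ := hb (String.ofList r) hmem' hp'
            rw [hfold] at hb'
            obtain rfl : b = b' := by injection hb'
            simpa using hle
          have heq : ('_' :: b.toList) = ('_' :: r) :=
            pvSuffix_eq_of_length hsfxtl hsfx' (by simp; omega)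
          have hrb : r = b.toList := by injection heq with _ hh; exact hh.symm
          show some b = pvScanB tokens tl
          rw [hscan, hrb]
          simp
      · exact absurd hcontra (by simp)
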